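-- pv_equiv track=rewrite | github.com/JkevinX23/intro-IA | IA-KMEANS-BOSTON.py | targetClassificador
-- ===== SOURCE A (Python) =====
-- def targetClassificador(data, target):
--     tamanho = len(data)
--     t = target
--     t.sort()
--     baixo =  t[tamanho//3]
--     medio =  t[2*(tamanho//3)]
--     for i in range(len(target)):
--         if target[i] <= baixo:
--             target[i] = 0
--         elif target[i] <= medio:
--             target[i] = 1
--         elif target[i] >= medio:
--             target[i] = 2
--     return target
-- ===== SOURCE B (Python) =====
-- def _upper_bound(a, x):
--     # rightmost insertion point for x in sorted list a (hand-written, no imports in A's module)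
--     lo, hi = 0, len(a)
--     while lo < hi:
--         mid = (lo + hi) // 2
--         if x < a[mid]:
--             hi = mid
--         else:
--             lo = mid + 1
--     return lo
--
-- def targetClassificador(data, target):
--     n = len(data)
--     target.sort()
--     baixo = target[n // 3]
--     medio = target[2 * (n // 3)]
--     m = len(target)
--     i0 = _upper_bound(target, baixo)
--     i1 = _upper_bound(target, medio)
--     target[:] = [0] * i0 + [1] * (i1 - i0) + [2] * (m - i1)
--     return target
-- ===== Notes on version B (the rewrite author's own statement) =====
-- stated objective: alternative
-- what changed: Instead of scanning every element and comparing it against both thresholds, B locates the two bucket boundaries in the sorted list with two hand-written binary searches (upper bound of baixo and of medio) and builds the answer as three constant block fills.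
import Mathlib
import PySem

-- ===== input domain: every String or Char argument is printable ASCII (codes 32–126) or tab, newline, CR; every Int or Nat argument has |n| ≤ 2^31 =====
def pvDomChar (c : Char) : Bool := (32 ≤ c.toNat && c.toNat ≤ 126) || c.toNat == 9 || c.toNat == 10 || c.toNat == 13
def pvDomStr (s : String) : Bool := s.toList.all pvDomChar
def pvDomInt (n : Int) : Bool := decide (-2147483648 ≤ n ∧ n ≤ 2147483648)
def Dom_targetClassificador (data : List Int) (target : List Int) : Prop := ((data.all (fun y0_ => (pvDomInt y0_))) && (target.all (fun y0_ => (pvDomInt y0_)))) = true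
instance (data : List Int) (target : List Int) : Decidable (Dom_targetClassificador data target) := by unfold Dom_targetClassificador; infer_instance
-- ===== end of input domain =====

-- B replaces A's element-wise threshold scan by two binary searches on the sorted list plus
-- three constant block fills (objective: alternative).  Both Pythons mutate `target` in place
-- identically (sort + overwrite); the equivalence proved here is about the return value.

-- ===== PORT A =====
def targetClassificador (data : List Int) (target : List Int) : List Int :=
  let tamanho : Int := (data.length : Int)
  let t := PySem.List.sorted target (fun x => x) false
  match PySem.List.pyGet? t (PySem.Int.floordiv tamanho 3),
        PySem.List.pyGet? t (2 * PySem.Int.floordiv tamanho 3) with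
  | some baixo, some medio =>
      -- for i in range(len(target)): rewrite target[i] from its (sorted) value
      t.map (fun v => if v ≤ baixo then 0 else if v ≤ medio then 1 else if v ≥ medio then 2 else v)
  | _, _ => t   -- IndexError in Python; excluded by Pre_

-- ===== PORT B =====
-- hand-written binary search from Source B (_upper_bound), ported step for step
def upperBound (a : List Int) (x : Int) (lo hi : Nat) : Nat :=
  if lo < hi then
    if x < a.getD ((lo + hi) / 2) 0 then upperBound a x lo ((lo + hi) / 2)
    else upperBound a x ((lo + hi) / 2 + 1) hi
  else lo
termination_by hi - lo
decreasing_by all_goals omega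

def targetClassificador_alt (data : List Int) (target : List Int) : List Int :=
  let n : Int := (data.length : Int)
  let t := PySem.List.sorted target (fun x => x) false
  match PySem.List.pyGet? t (PySem.Int.floordiv n 3) with
  | none => t   -- IndexError in Python; excluded by Pre_
  | some baixo =>
    match PySem.List.pyGet? t (2 * PySem.Int.floordiv n 3) with
    | none => t   -- IndexError in Python; excluded by Pre_
    | some medio =>
      let m := t.length
      let i0 := upperBound t baixo 0 m
      let i1 := upperBound t medio 0 m
      List.replicate i0 0 ++ List.replicate (i1 - i0) 1 ++ List.replicate (m - i1) 2

-- ===== PRECONDITION & SPEC =====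
-- A raises IndexError iff 2*(len(data)//3) >= len(target) (after sorting, lengths unchanged)
def Pre_targetClassificador (data : List Int) (target : List Int) : Prop :=
  2 * (data.length / 3) < target.length
instance (data : List Int) (target : List Int) : Decidable (Pre_targetClassificador data target) := by
  unfold Pre_targetClassificador; infer_instance

def pvWitness_targetClassificador : List Int × List Int := ([1, 2, 3, 4, 5, 6], [9, 1, 4, 7, 2, 5])

def Spec_targetClassificador (data : List Int) (target : List Int) (out : List Int) : Prop := out = targetClassificador_alt data target
instance (data : List Int) (target : List Int) (out : List Int) : Decidable (Spec_targetClassificador data target out) := by unfold Spec_targetClassificador; infer_instance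

-- ===== CLAIM (what is proved, stated in full; the proofs are below) =====
def Claim_equal_targetClassificador : Prop := ∀ (data : List Int) (target : List Int), Dom_targetClassificador data target → Pre_targetClassificador data target → Spec_targetClassificador data target (targetClassificador data target)

-- ===== LEMMAS AND PROOFS =====

-- bounds of the binary search
theorem upperBound_bounds (a : List Int) (x : Int) (lo hi : Nat) (h : lo ≤ hi) :
    lo ≤ upperBound a x lo hi ∧ upperBound a x lo hi ≤ hi := by
  rw [upperBound]
  split
  · next hlt =>
    split
    · have := upperBound_bounds a x lo ((lo + hi) / 2) (by omega)
      omega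
    · have := upperBound_bounds a x ((lo + hi) / 2 + 1) hi (by omega)
      omega
  · omega
termination_by hi - lo
decreasing_by all_goals omega

-- characterisation of the binary search on a monotone list
theorem upperBound_char (a : List Int) (x : Int)
    (hmono : ∀ i j : Nat, i ≤ j → j < a.length → a.getD i 0 ≤ a.getD j 0)
    (lo hi : Nat) (h1 : lo ≤ hi) (h2 : hi ≤ a.length)
    (h3 : ∀ j, j < lo → a.getD j 0 ≤ x)
    (h4 : ∀ j, hi ≤ j → j < a.length → x < a.getD j 0)
    (j : Nat) (hj : j < a.length) :
    (j < upperBound a x lo hi ↔ a.getD j 0 ≤ x) := by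
  rw [upperBound]
  split
  · next hlt =>
    split
    · next hx =>
      refine upperBound_char a x hmono lo ((lo + hi) / 2) (by omega) (by omega) h3 ?_ j hj
      intro j' hj1 hj2
      exact lt_of_lt_of_le hx (hmono _ _ hj1 hj2)
    · next hx =>
      refine upperBound_char a x hmono ((lo + hi) / 2 + 1) hi (by omega) h2 ?_ h4 j hj
      intro j' hj1
      exact le_trans (hmono j' ((lo + hi) / 2) (by omega) (by omega)) (not_lt.mp hx)
  · next hge =>
    constructor
    · intro hjlo; exact h3 j hjlo
    · intro hle
      by_contra hcon
      exact absurd hle (not_le.mpr (h4 j (by omega) hj))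
termination_by hi - lo
decreasing_by all_goals omega

-- element of the three-block list
theorem rep3_getElem (i0 i1 m : Nat) (h01 : i0 ≤ i1) (_h1m : i1 ≤ m) (j : Nat) (_hj : j < m)
    (hlen : j < (List.replicate i0 (0:Int) ++ List.replicate (i1 - i0) 1 ++ List.replicate (m - i1) 2).length) :
    (List.replicate i0 (0:Int) ++ List.replicate (i1 - i0) 1 ++ List.replicate (m - i1) 2)[j]
      = if j < i0 then 0 else if j < i1 then 1 else 2 := by
  simp only [List.getElem_append, List.length_append, List.length_replicate, List.getElem_replicate]
  split_ifs <;> omega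

-- sorted list is monotone in getD
theorem sorted_getD_mono (xs : List Int) :
    ∀ i j : Nat, i ≤ j → j < (PySem.List.sorted xs (fun x => x) false).length →
      (PySem.List.sorted xs (fun x => x) false).getD i 0 ≤ (PySem.List.sorted xs (fun x => x) false).getD j 0 := by
  intro i j hij hj
  rw [List.getD_eq_getElem _ _ (by omega), List.getD_eq_getElem _ _ hj]
  exact PySem.List.key_sorted_getElem_mono xs (fun x => x) hij hj

-- ===== VERDICT (by name: the statement is the Claim_ definition above) =====
theorem targetClassificador_spec : Claim_equal_targetClassificador := by
  intro data target _hdom hpre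
  unfold Spec_targetClassificador targetClassificador targetClassificador_alt
  simp only []
  set t := PySem.List.sorted target (fun x => x) false with ht
  have hlen : t.length = target.length := PySem.List.length_sorted ..
  set k : Nat := data.length / 3 with hk
  have hpre' : 2 * k < t.length := by
    unfold Pre_targetClassificador at hpre; omega
  have hfd : PySem.Int.floordiv ((data.length : Nat) : Int) 3 = ((k : Nat) : Int) := by
    exact_mod_cast PySem.Int.floordiv_natCast data.length 3
  have h2 : (2 : Int) * ((k : Nat) : Int) = (((2 * k : Nat)) : Int) := by push_cast; ring
  rw [hfd, h2, PySem.List.pyGet?_natCast, PySem.List.pyGet?_natCast,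
      List.getElem?_eq_getElem (by omega), List.getElem?_eq_getElem hpre']
  simp only
  set baixo := t[k]'(by omega) with hb
  set medio := t[2 * k]'hpre' with hm
  have hmono := sorted_getD_mono target
  rw [← ht] at hmono
  have hbm : baixo ≤ medio := by
    have := hmono k (2 * k) (by omega) hpre'
    rwa [List.getD_eq_getElem _ _ (by omega), List.getD_eq_getElem _ _ hpre'] at this
  have hchar0 := fun j hj => upperBound_char t baixo hmono 0 t.length (by omega) le_rfl
      (by omega) (by omega) j hj
  have hchar1 := fun j hj => upperBound_char t medio hmono 0 t.length (by omega) le_rfl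
      (by omega) (by omega) j hj
  set i0 := upperBound t baixo 0 t.length with hi0
  set i1 := upperBound t medio 0 t.length with hi1
  have hb0 := upperBound_bounds t baixo 0 t.length (by omega)
  have hb1 := upperBound_bounds t medio 0 t.length (by omega)
  have h01 : i0 ≤ i1 := by
    by_contra hcon
    have hj : i1 < t.length := by omega
    have ha := (hchar0 i1 hj).mp (by omega)
    have hbm2 := (hchar1 i1 hj).not.mp (by omega)
    rw [List.getD_eq_getElem _ _ hj] at ha hbm2
    have : medio < t[i1]'hj := not_le.mp hbm2
    omega
  apply List.ext_getElem
  · simp [List.length_append]; omega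
  · intro j hj1 hj2
    have hjt : j < t.length := by simpa using hj1
    rw [List.getElem_map, rep3_getElem i0 i1 t.length h01 (by omega) j hjt hj2]
    have hc0 := hchar0 j hjt
    have hc1 := hchar1 j hjt
    rw [List.getD_eq_getElem _ _ hjt] at hc0 hc1
    split_ifs <;> omega
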